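-- pv_equiv track=rewrite | github.com/azizanwazir/comp0138_chess | utils.py | ActiveInactiveDaysAndPeriods
-- ===== SOURCE A (Python) =====
-- def ActiveInactiveDaysAndPeriods(game_ls):
--     # Find total number of zeros in the list (days on which player played no games: days of inactivity) and divide by number of periods of inactivity (consecutive days of inactivity)
--     # i.e. [0, 1, 1, 0, 0, 1, 1, 0] --> 4 days of inactivity, 3 periods of activity
--     # return 4/3 = 1.34 days between sessions on average
--
--     # TODO: Ignore leading and trailing zeros
--     # i.e. [0, 0, 0, 0, 1, 1, 1, 1, 0, 0, 0, 0] gives average 0 days between sessions instead of 4 (8 inactive days/2 inactive periods)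
--
--     inactive_days = 0
--     inactive_periods = 0
--     active_days = 0
--     active_periods = 0
--     for d in range(0, len(game_ls)):
--         if(d == len(game_ls) - 1):
--             if(game_ls[d] == 0):
--                 inactive_days += 1
--                 inactive_periods += 1
--             else:
--                 active_days += 1
--                 active_periods += 1
--         else:
--             if(game_ls[d] == 0):
--                 inactive_days += 1
--                 if(game_ls[d+1] != 0):
--                     inactive_periods += 1
--             else:
--                 active_days += 1
--                 if(game_ls[d+1] == 0):
--                     active_periods += 1
--
--
--
--     return active_days, inactive_days, active_periods, inactive_periods
-- ===== SOURCE B (Python) =====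
-- def ActiveInactiveDaysAndPeriods(game_ls):
--     # Run-based aggregation: scan each maximal run of equal activity class once,
--     # adding its length to the day counter and 1 to the period counter.
--     active_days = 0
--     inactive_days = 0
--     active_periods = 0
--     inactive_periods = 0
--     i = 0
--     n = len(game_ls)
--     while i < n:
--         inactive = game_ls[i] == 0
--         j = i + 1
--         while j < n and (game_ls[j] == 0) == inactive:
--             j += 1
--         if inactive:
--             inactive_days += j - i
--             inactive_periods += 1
--         else:
--             active_days += j - i
--             active_periods += 1
--         i = j
--     return active_days, inactive_days, active_periods, inactive_periods
-- ===== Notes on version B (the rewrite author's own statement) =====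
-- stated objective: alternative
-- what changed: B aggregates by maximal runs (an inner scan finds each run's end, then adds the run length and one period at once) instead of A's per-index loop with a next-element lookahead and a last-index special case.
import Mathlib
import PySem

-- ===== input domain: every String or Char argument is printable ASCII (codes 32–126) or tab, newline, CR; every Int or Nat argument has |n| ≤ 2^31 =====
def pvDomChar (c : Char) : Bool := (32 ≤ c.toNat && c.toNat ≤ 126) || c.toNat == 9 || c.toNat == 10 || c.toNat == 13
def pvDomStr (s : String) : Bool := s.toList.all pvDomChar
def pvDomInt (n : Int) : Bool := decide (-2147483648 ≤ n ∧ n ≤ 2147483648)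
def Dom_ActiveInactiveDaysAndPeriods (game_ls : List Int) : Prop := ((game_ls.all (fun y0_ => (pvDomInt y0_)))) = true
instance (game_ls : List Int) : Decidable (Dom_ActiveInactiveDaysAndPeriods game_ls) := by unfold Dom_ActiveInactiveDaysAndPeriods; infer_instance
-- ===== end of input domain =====

-- B replaces A's per-index loop (with next-element lookahead and a last-index
-- special case) by aggregation over maximal runs of equal activity class.

-- ===== PORT A =====
-- loop body of A: at index d, branch on last index, else look ahead at d+1
def aBody (game_ls : List Int) (st : Int × Int × Int × Int) (d : Int) : Int × Int × Int × Int :=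
  if d = PySem.List.len game_ls - 1 then
    if PySem.List.pyGetD game_ls d 0 = 0 then (st.1, st.2.1 + 1, st.2.2.1, st.2.2.2 + 1)
    else (st.1 + 1, st.2.1, st.2.2.1 + 1, st.2.2.2)
  else
    if PySem.List.pyGetD game_ls d 0 = 0 then
      (st.1, st.2.1 + 1, st.2.2.1,
        if PySem.List.pyGetD game_ls (d + 1) 0 ≠ 0 then st.2.2.2 + 1 else st.2.2.2)
    else
      (st.1 + 1, st.2.1,
        if PySem.List.pyGetD game_ls (d + 1) 0 = 0 then st.2.2.1 + 1 else st.2.2.1, st.2.2.2)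

def ActiveInactiveDaysAndPeriods (game_ls : List Int) : Int × Int × Int × Int :=
  (PySem.List.pyRange 0 (PySem.List.len game_ls) 1).foldl (aBody game_ls) (0, 0, 0, 0)

-- ===== PORT B =====
-- inner scan of B: length of the maximal prefix of xs in activity class c
def runLen (c : Bool) : List Int → Nat
  | [] => 0
  | y :: t => if (decide (y = 0)) = c then runLen c t + 1 else 0

-- outer loop of B: peel one maximal run per step, add its length and one period
def altLoop : List Int → Int × Int × Int × Int → Int × Int × Int × Int
  | [], st => st
  | x :: xs, st =>
    let c := decide (x = 0)
    let k : Int := 1 + runLen c xs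
    let rest := xs.drop (runLen c xs)
    if c then altLoop rest (st.1, st.2.1 + k, st.2.2.1, st.2.2.2 + 1)
    else altLoop rest (st.1 + k, st.2.1, st.2.2.1 + 1, st.2.2.2)
termination_by xs => xs.length
decreasing_by
  · simp only [List.length_drop, List.length_cons]; omega
  · simp only [List.length_drop, List.length_cons]; omega

def ActiveInactiveDaysAndPeriods_alt (game_ls : List Int) : Int × Int × Int × Int :=
  altLoop game_ls (0, 0, 0, 0)

-- ===== PRECONDITION & SPEC =====
def Spec_ActiveInactiveDaysAndPeriods (game_ls : List Int) (out : Int × Int × Int × Int) : Prop := out = ActiveInactiveDaysAndPeriods_alt game_ls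
instance (game_ls : List Int) (out : Int × Int × Int × Int) : Decidable (Spec_ActiveInactiveDaysAndPeriods game_ls out) := by unfold Spec_ActiveInactiveDaysAndPeriods; infer_instance

-- ===== CLAIM (what is proved, stated in full; the proofs are below) =====
def Claim_equal_ActiveInactiveDaysAndPeriods : Prop := ∀ (game_ls : List Int), Dom_ActiveInactiveDaysAndPeriods game_ls → Spec_ActiveInactiveDaysAndPeriods game_ls (ActiveInactiveDaysAndPeriods game_ls)

-- ===== LEMMAS AND PROOFS =====
def add4 (p q : Int × Int × Int × Int) : Int × Int × Int × Int :=
  (p.1 + q.1, p.2.1 + q.2.1, p.2.2.1 + q.2.2.1, p.2.2.2 + q.2.2.2)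

-- the contribution of one element, given the element after it (if any)
def δ4 (x : Int) (next : Option Int) : Int × Int × Int × Int :=
  match next with
  | none => if x = 0 then (0, 1, 0, 1) else (1, 0, 1, 0)
  | some y =>
    if x = 0 then (0, 1, 0, if y = 0 then 0 else 1)
    else (1, 0, if y = 0 then 1 else 0, 0)

def specF : List Int → Int × Int × Int × Int
  | [] => (0, 0, 0, 0)
  | x :: ys => add4 (δ4 x ys.head?) (specF ys)

theorem add4_zero (p : Int × Int × Int × Int) : add4 p (0, 0, 0, 0) = p := by
  simp [add4]

theorem zero_add4 (p : Int × Int × Int × Int) : add4 (0, 0, 0, 0) p = p := by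
  simp [add4]

theorem add4_assoc (p q r : Int × Int × Int × Int) :
    add4 (add4 p q) r = add4 p (add4 q r) := by
  simp [add4, add_assoc]

-- ---- B-side ----
theorem altLoop_peel (x : Int) (xs : List Int) (st : Int × Int × Int × Int) :
    altLoop (x :: xs) st = altLoop xs (add4 st (δ4 x xs.head?)) := by
  cases xs with
  | nil =>
    by_cases hx : x = 0 <;> simp [altLoop, runLen, add4, δ4, hx]
  | cons y t =>
    by_cases hx : x = 0 <;> by_cases hy : y = 0 <;>
      simp [altLoop, runLen, add4, δ4, hx, hy] <;> ring_nf
theorem altLoop_spec (xs : List Int) : ∀ st, altLoop xs st = add4 st (specF xs) := by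
  induction xs with
  | nil => intro st; simp [altLoop, specF, add4_zero]
  | cons x t ih =>
    intro st
    rw [altLoop_peel, ih, specF, ← add4_assoc]

-- ---- A-side ----
theorem aBody_shift (x : Int) (ys : List Int) (st : Int × Int × Int × Int) (k : Int)
    (hk0 : 0 ≤ k) (hk : k < PySem.List.len ys) :
    aBody (x :: ys) st (1 + k) = aBody ys st k := by
  obtain ⟨m, rfl⟩ : ∃ m : Nat, k = (m : Int) := ⟨k.toNat, by omega⟩
  have hm : m < ys.length := by simp only [PySem.List.len_eq] at hk; exact_mod_cast hk
  have h1 : (1 + (m : Int)) = ((m + 1 : Nat) : Int) := by push_cast; ring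
  have h2 : (((m + 1 : Nat) : Int)) + 1 = ((m + 1 + 1 : Nat) : Int) := by push_cast; ring
  have hk1 : ((m : Int)) + 1 = ((m + 1 : Nat) : Int) := by push_cast; ring
  have hc : ((((m + 1 : Nat) : Int)) = PySem.List.len (x :: ys) - 1) ↔ ((m : Int) = PySem.List.len ys - 1) := by
    simp only [PySem.List.len_eq, List.length_cons]; omega
  simp only [aBody, h1, h2, hk1, PySem.List.pyGetD_natCast, List.getD_cons_succ, hc]

theorem aBody_zero (x : Int) (ys : List Int) (st : Int × Int × Int × Int) :
    aBody (x :: ys) st 0 = add4 st (δ4 x ys.head?) := by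
  cases ys with
  | nil =>
    by_cases hx : x = 0 <;>
      simp [aBody, δ4, add4, hx, PySem.List.len_eq, PySem.List.pyGetD_zero]
  | cons y t =>
    have hne : ¬((0 : Int) = PySem.List.len (x :: y :: t) - 1) := by
      simp only [PySem.List.len_eq, List.length_cons]; omega
    have hget0 : PySem.List.pyGetD (x :: y :: t) 0 0 = x := by
      rw [PySem.List.pyGetD_zero]; rfl
    have hget1 : PySem.List.pyGetD (x :: y :: t) (0 + 1) 0 = y := by
      rw [show ((0 : Int) + 1) = ((1 : Nat) : Int) by norm_num, PySem.List.pyGetD_natCast]; rfl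
    rw [aBody, if_neg hne, hget0, hget1]
    by_cases hx : x = 0 <;> by_cases hy : y = 0 <;> simp [δ4, add4, hx, hy]

-- shifting an index fold by one: fold over range(a+1, b+1) of f = fold over range(a, b) of g
theorem pyRange_shift_fold {S : Type} (f g : S → Int → S) (b : Int)
    (h : ∀ st k, 0 ≤ k → k < b → f st (1 + k) = g st k) :
    ∀ (n : Nat) (a : Int) (st : S), 0 ≤ a → (b - a).toNat = n →
      (PySem.List.pyRange (a + 1) (b + 1) 1).foldl f st = (PySem.List.pyRange a b 1).foldl g st := by
  intro n
  induction n with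
  | zero =>
    intro a st ha hn
    have hba : b ≤ a := by omega
    rw [PySem.List.pyRange_one_eq_nil (by omega), PySem.List.pyRange_one_eq_nil hba]
    rfl
  | succ m ih =>
    intro a st ha hn
    have hab : a < b := by omega
    rw [PySem.List.pyRange_one_cons (by omega : a + 1 < b + 1),
        PySem.List.pyRange_one_cons hab, List.foldl_cons, List.foldl_cons]
    have hf : f st (a + 1) = g st a := by rw [show a + 1 = 1 + a by ring]; exact h st a ha hab
    rw [hf]
    exact ih (a + 1) (g st a) (by omega) (by omega)

theorem afold_spec (xs : List Int) : ∀ st,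
    (PySem.List.pyRange 0 (PySem.List.len xs) 1).foldl (aBody xs) st = add4 st (specF xs) := by
  induction xs with
  | nil =>
    intro st
    rw [PySem.List.pyRange_one_eq_nil (by simp [PySem.List.len_eq])]
    simp [specF, add4_zero]
  | cons x ys ih =>
    intro st
    have hb : PySem.List.len (x :: ys) = PySem.List.len ys + 1 := by
      simp only [PySem.List.len_eq, List.length_cons]; push_cast; ring
    have hpos : (0 : Int) < PySem.List.len (x :: ys) := by
      simp only [PySem.List.len_eq, List.length_cons]; positivity
    rw [PySem.List.pyRange_one_cons hpos, List.foldl_cons, hb,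
        pyRange_shift_fold (aBody (x :: ys)) (aBody ys) (PySem.List.len ys)
          (fun st' k hk0 hk => aBody_shift x ys st' k hk0 hk)
          (PySem.List.len ys).toNat 0 (aBody (x :: ys) st 0) le_rfl (by omega),
        ih (aBody (x :: ys) st 0), aBody_zero, specF, ← add4_assoc]

-- ===== VERDICT (by name: the statement is the Claim_ definition above) =====
theorem ActiveInactiveDaysAndPeriods_spec : Claim_equal_ActiveInactiveDaysAndPeriods := by
  intro gl _
  unfold Spec_ActiveInactiveDaysAndPeriods ActiveInactiveDaysAndPeriods ActiveInactiveDaysAndPeriods_alt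
  rw [afold_spec, altLoop_spec, zero_add4]
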